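-- pv_equiv track=rewrite | github.com/eric-20-20/betting-aggregate | scripts/analysis/pattern_audit.py | fmt_odds_dist
-- ===== SOURCE A (Python) =====
-- from collections import defaultdict, Counter
--
-- def fmt_odds_dist(dist: Counter) -> str:
--     if not dist:
--         return "{}"
--     buckets_order = ["<=-400", "-400 to -301", "-300 to -201", "-200 to -151",
--                      "-150 to -111", "-110 to -1", "EVEN", "N/A"]
--     parts = []
--     for b in buckets_order:
--         if b in dist:
--             parts.append(f"{b}: {dist[b]}")
--     # anything else (positive odds)
--     for b in sorted(dist.keys()):
--         if b not in buckets_order: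
--             parts.append(f"{b}: {dist[b]}")
--     return "{" + ", ".join(parts) + "}"
-- ===== SOURCE B (Python) =====
-- def fmt_odds_dist(dist) -> str:
--     buckets_order = ["<=-400", "-400 to -301", "-300 to -201", "-200 to -151",
--                      "-150 to -111", "-110 to -1", "EVEN", "N/A"]
--     order = {b: i for i, b in enumerate(buckets_order)}
--     n = len(buckets_order)
--     keys = sorted(dist, key=lambda k: (order.get(k, n), k))
--     return "{" + ", ".join(f"{k}: {dist[k]}" for k in keys) + "}"
-- ===== Notes on version B (the rewrite author's own statement) =====
-- stated objective: alternative
-- what changed: A's two separate output passes (scan the fixed bucket list for present keys, then scan the sorted remaining keys) are collapsed into one sorted pass over all keys using the composite key (bucket-index-or-8, key), built from an index dict over buckets_order.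
import Mathlib
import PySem

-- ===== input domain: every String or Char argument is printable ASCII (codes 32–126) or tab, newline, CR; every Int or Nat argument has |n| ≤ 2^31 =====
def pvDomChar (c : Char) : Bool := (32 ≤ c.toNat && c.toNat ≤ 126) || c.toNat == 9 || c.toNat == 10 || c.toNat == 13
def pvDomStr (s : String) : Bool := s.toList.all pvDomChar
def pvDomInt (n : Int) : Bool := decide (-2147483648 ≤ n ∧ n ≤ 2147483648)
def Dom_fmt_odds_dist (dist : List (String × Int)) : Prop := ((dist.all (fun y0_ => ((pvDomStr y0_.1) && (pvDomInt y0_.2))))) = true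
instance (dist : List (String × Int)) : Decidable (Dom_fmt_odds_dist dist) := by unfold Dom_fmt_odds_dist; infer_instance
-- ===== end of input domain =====

-- B replaces A's two passes (fixed bucket scan, then a sorted scan of the leftovers) by ONE sorted
-- pass over all keys under the composite key (bucket-index-or-8, key); same output (objective: alternative).

-- the bucket label list both Python sources contain verbatim
def pvBuckets : List String :=
  ["<=-400", "-400 to -301", "-300 to -201", "-200 to -151",
   "-150 to -111", "-110 to -1", "EVEN", "N/A"]

-- ===== PORT A =====
def fmt_odds_dist (dist : List (String × Int)) : String :=
  if dist = [] then "{}"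
  else
    let d := PySem.Dict.ofList dist
    let parts : List String :=
      pvBuckets.foldl
        (fun ps b => if d.contains b = true then ps ++ [b ++ ": " ++ PySem.Int.toStr (d.getD b 0)] else ps) []
    let parts :=
      (PySem.List.sorted d.keys (fun k => k) false).foldl
        (fun ps b => if (!pvBuckets.contains b) = true then ps ++ [b ++ ": " ++ PySem.Int.toStr (d.getD b 0)] else ps) parts
    "{" ++ PySem.Str.join ", " parts ++ "}"

-- ===== PORT B =====
-- order = {b: i for i, b in enumerate(buckets_order)}
def pvOrder : PySem.Dict String Int :=
  PySem.Dict.ofList ((PySem.List.enumerate pvBuckets).map (fun ib => (ib.2, ib.1)))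

-- key=lambda k: (order.get(k, n), k)  — a Python tuple compares lexicographically
def pvKey (k : String) : Lex (Int × String) := toLex (pvOrder.getD k 8, k)

def fmt_odds_dist_alt (dist : List (String × Int)) : String :=
  let d := PySem.Dict.ofList dist
  let ks := PySem.List.sorted d.keys pvKey false
  "{" ++ PySem.Str.join ", " (ks.map (fun k => k ++ ": " ++ PySem.Int.toStr (d.getD k 0))) ++ "}"

-- ===== PRECONDITION & SPEC =====
def Spec_fmt_odds_dist (dist : List (String × Int)) (out : String) : Prop := out = fmt_odds_dist_alt dist
instance (dist : List (String × Int)) (out : String) : Decidable (Spec_fmt_odds_dist dist out) := by unfold Spec_fmt_odds_dist; infer_instance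

-- ===== CLAIM (what is proved, stated in full; the proofs are below) =====
def Claim_equal_fmt_odds_dist : Prop := ∀ (dist : List (String × Int)), Dom_fmt_odds_dist dist → Spec_fmt_odds_dist dist (fmt_odds_dist dist)

-- ===== LEMMAS AND PROOFS =====

-- every bucket label sits strictly below index 8
theorem pvIdx_lt (a : String) (ha : a ∈ pvBuckets) : pvOrder.getD a 8 < 8 := by
  fin_cases ha <;> decide

-- a non-bucket key gets the default index 8
theorem pvIdx_out (b : String) (hb : ¬ b ∈ pvBuckets) : pvOrder.getD b 8 = 8 := by
  apply PySem.Dict.getD_of_not_contains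
  have hk : pvOrder.keys = pvBuckets := by decide
  rw [Bool.eq_false_iff]
  intro hc
  exact hb (hk ▸ (PySem.Dict.contains_iff_mem_keys pvOrder b).mp hc)

theorem pvKey_lt_of_mem_not_mem (a b : String) (ha : a ∈ pvBuckets) (hb : ¬ b ∈ pvBuckets) :
    pvKey a < pvKey b := by
  have := pvIdx_lt a ha
  have h8 := pvIdx_out b hb
  rw [pvKey, pvKey, Prod.Lex.lt_iff]
  left; simpa [h8]

theorem pvKey_lt_of_out_out (a b : String) (ha : ¬ a ∈ pvBuckets) (hb : ¬ b ∈ pvBuckets)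
    (hab : a < b) : pvKey a < pvKey b := by
  rw [pvKey, pvKey, Prod.Lex.lt_iff]
  right
  refine ⟨?_, by simpa using hab⟩
  simp [pvIdx_out a ha, pvIdx_out b hb]

-- the single composite-key sort is exactly "present buckets in fixed order, then sorted leftovers"
theorem pv_sorted_split (d : PySem.Dict String Int) (hnd : d.keys.Nodup) :
    PySem.List.sorted d.keys pvKey false =
      pvBuckets.filter (fun b => d.contains b) ++
      (PySem.List.sorted d.keys (fun k => k) false).filter (fun b => !pvBuckets.contains b) := by
  apply PySem.List.sorted_eq_of_perm_of_pairwise_lt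
  · have hperm2 : ((PySem.List.sorted d.keys (fun k => k) false).filter (fun b => !pvBuckets.contains b)).Perm
        (d.keys.filter (fun b => !pvBuckets.contains b)) :=
      (PySem.List.sorted_perm d.keys (fun k => k) false).filter _
    have hperm1 : (pvBuckets.filter (fun b => d.contains b)).Perm
        (d.keys.filter (fun b => pvBuckets.contains b)) := by
      rw [List.perm_ext_iff_of_nodup ((by decide : pvBuckets.Nodup).filter _) (hnd.filter _)]
      intro x
      simp only [List.mem_filter, PySem.Dict.contains_iff_mem_keys, List.contains_iff_mem]
      tauto
    exact (hperm1.append hperm2).trans (List.filter_append_perm _ _)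
  · rw [List.pairwise_append]
    refine ⟨?_, ?_, ?_⟩
    · exact (by decide : List.Pairwise (fun a b => pvKey a < pvKey b) pvBuckets).filter _
    · have h1 : List.Pairwise (fun a b : String => a ≤ b) (PySem.List.sorted d.keys (fun k => k) false) :=
        PySem.List.sorted_pairwise d.keys (fun k => k)
      have h2 : (PySem.List.sorted d.keys (fun k => k) false).Nodup :=
        (PySem.List.sorted_perm d.keys (fun k => k) false).nodup_iff.mpr hnd
      have h3 : List.Pairwise (fun a b : String => a < b) (PySem.List.sorted d.keys (fun k => k) false) :=
        (h1.and h2).imp (fun ⟨hle, hne⟩ => lt_of_le_of_ne hle hne)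
      refine (h3.filter _).imp_of_mem ?_
      intro a b ha hb hab
      exact pvKey_lt_of_out_out a b
        (by simpa using List.of_mem_filter ha) (by simpa using List.of_mem_filter hb) hab
    · intro a ha b hb
      exact pvKey_lt_of_mem_not_mem a b (List.mem_of_mem_filter ha)
        (by simpa using List.of_mem_filter hb)

theorem fmt_odds_dist_spec' (dist : List (String × Int)) :
    fmt_odds_dist dist = fmt_odds_dist_alt dist := by
  by_cases h : dist = []
  · subst h; decide
  · simp only [fmt_odds_dist, fmt_odds_dist_alt, if_neg h]
    rw [PySem.List.foldl_append_if, PySem.List.foldl_append_if,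
      pv_sorted_split _ (PySem.Dict.nodup_keys_ofList dist)]
    simp

-- ===== VERDICT (by name: the statement is the Claim_ definition above) =====
theorem fmt_odds_dist_spec : Claim_equal_fmt_odds_dist := by
  intro dist _
  exact fmt_odds_dist_spec' dist
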